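-- pv_equiv track=rewrite | github.com/eenvil/Stage12_remote_run | stage2/main.py | find_point_intensity_keys
-- ===== SOURCE A (Python) =====
-- def find_point_intensity_keys(params) -> list[str]:
--     keys = []
--     for k in params.keys():
--         kl = k.lower()
--         if kl.startswith("point_") and ("intensity.value" in kl or kl.endswith(".intensity.value")):
--             keys.append(k)
--     if not keys:
--         for k in params.keys():
--             kl = k.lower()
--             if kl.startswith("point_") and "intensity" in kl:
--                 keys.append(k)
--     return sorted(keys)
-- ===== SOURCE B (Python) =====
-- def find_point_intensity_keys(params) -> list[str]:
--     strict, loose = [], []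
--     for k in params.keys():
--         kl = k.lower()
--         if kl.startswith("point_") and "intensity" in kl:
--             loose.append(k)
--             if "intensity.value" in kl:
--                 strict.append(k)
--     return sorted(strict or loose)
-- ===== Notes on version B (the rewrite author's own statement) =====
-- stated objective: simpler
-- what changed: One pass with two accumulators (strict/loose) replaces A's two conditional scans; the redundant endswith clause is dropped since '.intensity.value' as a suffix already implies 'intensity.value' as a substring, and strict matches are a subset of loose matches.
import Mathlib
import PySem

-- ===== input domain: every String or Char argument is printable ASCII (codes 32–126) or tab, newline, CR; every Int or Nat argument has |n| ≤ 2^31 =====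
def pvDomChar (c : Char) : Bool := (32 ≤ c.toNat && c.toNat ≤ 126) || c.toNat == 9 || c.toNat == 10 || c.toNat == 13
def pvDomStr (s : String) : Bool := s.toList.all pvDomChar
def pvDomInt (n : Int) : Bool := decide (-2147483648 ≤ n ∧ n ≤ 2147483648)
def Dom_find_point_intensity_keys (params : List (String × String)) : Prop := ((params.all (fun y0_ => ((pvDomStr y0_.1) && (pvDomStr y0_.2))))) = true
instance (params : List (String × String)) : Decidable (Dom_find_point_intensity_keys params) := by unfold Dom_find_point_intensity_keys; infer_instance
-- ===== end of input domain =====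

-- B is 'simpler': one pass with two accumulators replaces A's two conditional scans
-- (the redundant endswith clause is dropped: the suffix '.intensity.value' already implies the substring 'intensity.value').

-- ===== PORT A =====
def find_point_intensity_keys (params : List (String × String)) : List String :=
  let keys := (PySem.Dict.ofList params).keys.foldl (fun acc k =>
    let kl := PySem.Str.lower k
    if PySem.Str.startswith kl "point_" &&
        (PySem.Str.isIn "intensity.value" kl || PySem.Str.endswith kl ".intensity.value")
    then acc ++ [k] else acc) []
  let keys := if keys = [] then
      (PySem.Dict.ofList params).keys.foldl (fun acc k =>
        let kl := PySem.Str.lower k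
        if PySem.Str.startswith kl "point_" && PySem.Str.isIn "intensity" kl
        then acc ++ [k] else acc) keys
    else keys
  PySem.List.sorted keys (fun x => x) false

-- ===== PORT B =====
def find_point_intensity_keys_alt (params : List (String × String)) : List String :=
  let p := (PySem.Dict.ofList params).keys.foldl (fun (sl : List String × List String) k =>
    let kl := PySem.Str.lower k
    if PySem.Str.startswith kl "point_" && PySem.Str.isIn "intensity" kl then
      let loose := sl.2 ++ [k]
      if PySem.Str.isIn "intensity.value" kl then (sl.1 ++ [k], loose) else (sl.1, loose)
    else sl) ([], [])
  PySem.List.sorted (if p.1 = [] then p.2 else p.1) (fun x => x) false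

-- ===== PRECONDITION & SPEC =====
def Spec_find_point_intensity_keys (params : List (String × String)) (out : List String) : Prop := out = find_point_intensity_keys_alt params
instance (params : List (String × String)) (out : List String) : Decidable (Spec_find_point_intensity_keys params out) := by unfold Spec_find_point_intensity_keys; infer_instance

-- ===== CLAIM (what is proved, stated in full; the proofs are below) =====
def Claim_equal_find_point_intensity_keys : Prop := ∀ (params : List (String × String)), Dom_find_point_intensity_keys params → Spec_find_point_intensity_keys params (find_point_intensity_keys params)

-- ===== LEMMAS AND PROOFS =====

-- the strict/loose predicates both programs filter by
def pvStrict (k : String) : Bool :=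
  PySem.Str.startswith (PySem.Str.lower k) "point_" &&
    PySem.Str.isIn "intensity.value" (PySem.Str.lower k)
def pvLoose (k : String) : Bool :=
  PySem.Str.startswith (PySem.Str.lower k) "point_" &&
    PySem.Str.isIn "intensity" (PySem.Str.lower k)

theorem isIn_value_of_endswith (s : String) :
    PySem.Str.endswith s ".intensity.value" = true →
    PySem.Str.isIn "intensity.value" s = true := by
  intro h
  rw [PySem.Str.isIn_iff_infix]
  have hsuf : (".intensity.value" : String).toList <:+ s.toList := by
    rw [PySem.Str.endswith_eq, PySem.Chars.endswith_iff] at h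
    exact h
  have hin : ("intensity.value" : String).toList <:+: (".intensity.value" : String).toList := by
    decide
  exact hin.trans hsuf.isInfix

theorem loose_of_strict (k : String) : pvStrict k = true → pvLoose k = true := by
  unfold pvStrict pvLoose
  intro h
  rw [Bool.and_eq_true] at h ⊢
  refine ⟨h.1, ?_⟩
  rw [PySem.Str.isIn_iff_infix] at h ⊢
  have hin : ("intensity" : String).toList <:+: ("intensity.value" : String).toList := by
    decide
  exact hin.trans h.2

-- A's first loop filters exactly pvStrict (the endswith clause is redundant)
theorem A_strict_loop (l : List String) :
    l.foldl (fun acc k =>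
      let kl := PySem.Str.lower k
      if PySem.Str.startswith kl "point_" &&
          (PySem.Str.isIn "intensity.value" kl || PySem.Str.endswith kl ".intensity.value")
      then acc ++ [k] else acc) [] = l.filter pvStrict := by
  rw [PySem.List.foldl_append_if_eq_filter]
  simp only [List.nil_append]
  apply List.filter_congr
  intro k _
  unfold pvStrict
  by_cases he : PySem.Str.endswith (PySem.Str.lower k) ".intensity.value" = true
  · have hv := isIn_value_of_endswith _ he
    simp only [he, hv, Bool.true_or]
  · simp only [Bool.eq_false_iff.mpr he, Bool.or_false]

theorem A_loose_loop (l : List String) (acc : List String) :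
    l.foldl (fun acc k =>
      let kl := PySem.Str.lower k
      if PySem.Str.startswith kl "point_" && PySem.Str.isIn "intensity" kl
      then acc ++ [k] else acc) acc = acc ++ l.filter pvLoose := by
  rw [PySem.List.foldl_append_if_eq_filter]
  rfl

-- B's single loop accumulates the two filters
theorem B_loop (l : List String) (s lo : List String) :
    l.foldl (fun (sl : List String × List String) k =>
      let kl := PySem.Str.lower k
      if PySem.Str.startswith kl "point_" && PySem.Str.isIn "intensity" kl then
        let loose := sl.2 ++ [k]
        if PySem.Str.isIn "intensity.value" kl then (sl.1 ++ [k], loose) else (sl.1, loose)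
      else sl) (s, lo) = (s ++ l.filter pvStrict, lo ++ l.filter pvLoose) := by
  induction l generalizing s lo with
  | nil => simp
  | cons k t ih =>
    simp only [List.foldl_cons, List.filter_cons]
    by_cases hl : (PySem.Str.startswith (PySem.Str.lower k) "point_" &&
        PySem.Str.isIn "intensity" (PySem.Str.lower k)) = true
    · have hloose : pvLoose k = true := hl
      by_cases hv : PySem.Str.isIn "intensity.value" (PySem.Str.lower k) = true
      · have hstrict : pvStrict k = true := by
          unfold pvStrict
          rw [Bool.and_eq_true] at hl ⊢
          exact ⟨hl.1, hv⟩
        show List.foldl _ (if _ then (if _ then _ else _) else _) t = _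
        rw [if_pos hl, if_pos hv, ih, if_pos hstrict, if_pos hloose]
        simp
      · have hstrict : pvStrict k = false := by
          unfold pvStrict
          rw [Bool.eq_false_iff.mpr hv, Bool.and_false]
        show List.foldl _ (if _ then (if _ then _ else _) else _) t = _
        rw [if_pos hl, if_neg hv, ih, if_neg (by simp [hstrict]), if_pos hloose]
        simp
    · have hloose : pvLoose k = false := Bool.eq_false_iff.mpr hl
      have hstrict : pvStrict k = false := by
        cases hx : pvStrict k
        · rfl
        · exact absurd (loose_of_strict k hx) (by simp [hloose])
      show List.foldl _ (if _ then (if _ then _ else _) else _) t = _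
      rw [if_neg hl, ih, if_neg (by simp [hstrict]), if_neg (by simp [hloose])]

-- ===== VERDICT (by name: the statement is the Claim_ definition above) =====
theorem find_point_intensity_keys_spec : Claim_equal_find_point_intensity_keys := by
  intro params _
  unfold Spec_find_point_intensity_keys find_point_intensity_keys find_point_intensity_keys_alt
  rw [A_strict_loop, B_loop]
  simp only [List.nil_append]
  by_cases h : ((PySem.Dict.ofList params).keys.filter pvStrict) = []
  · rw [if_pos h, if_pos h, A_loose_loop, h, List.nil_append]
  · rw [if_neg h, if_neg h]
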